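-- pv_equiv track=rewrite | github.com/ViraKrajevskiy/Python-tasks | 18/127.py | array_127
-- ===== SOURCE A (Python) =====
-- def array_127(array, K):
--     result = []
--     current_series = []
--     previous_value = None
--
--     for element in array:
--         if element == previous_value:
--             current_series.append(element)
--         else:
--             if len(current_series) > K:
--                 result.extend([0] * len(current_series))
--             else:
--                 result.extend(current_series)
--             current_series = [element]
--         previous_value = element
--
--     if len(current_series) > K:
--         result.extend([0] * len(current_series))
--     else:
--         result.extend(current_series)
--
--     return result
-- ===== SOURCE B (Python) =====
-- def array_127(array, K):
--     # Two staged passes over per-element run lengths instead of A's streaming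
--     # run-buffer state machine: (1) forward scan computes, for each position,
--     # the length of the run of equal values ending there; (2) backward scan
--     # propagates each run's full length to all of its positions; (3) an
--     # elementwise map zeroes elements whose run length exceeds K.
--     fwd = []
--     acc = 0
--     prev = None
--     for x in array:
--         acc = acc + 1 if x == prev else 1
--         fwd.append(acc)
--         prev = x
--     runlen = []
--     carry = 0
--     prev = None
--     for x, f in reversed(list(zip(array, fwd))):
--         if x != prev:
--             carry = f
--         runlen.append(carry)
--         prev = x
--     runlen.reverse()
--     return [0 if r > K else x for x, r in zip(array, runlen)]
-- ===== Notes on version B (the rewrite author's own statement) =====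
-- stated objective: alternative
-- what changed: Replaced A's streaming run-buffer state machine (accumulate a current_series, flush it zeroed or verbatim at each value change and once more after the loop) by three staged passes: a forward scan computing the run length ending at each position, a backward scan propagating each run's full length to all its positions, and an elementwise map zeroing positions whose run length exceeds K.
import Mathlib
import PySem

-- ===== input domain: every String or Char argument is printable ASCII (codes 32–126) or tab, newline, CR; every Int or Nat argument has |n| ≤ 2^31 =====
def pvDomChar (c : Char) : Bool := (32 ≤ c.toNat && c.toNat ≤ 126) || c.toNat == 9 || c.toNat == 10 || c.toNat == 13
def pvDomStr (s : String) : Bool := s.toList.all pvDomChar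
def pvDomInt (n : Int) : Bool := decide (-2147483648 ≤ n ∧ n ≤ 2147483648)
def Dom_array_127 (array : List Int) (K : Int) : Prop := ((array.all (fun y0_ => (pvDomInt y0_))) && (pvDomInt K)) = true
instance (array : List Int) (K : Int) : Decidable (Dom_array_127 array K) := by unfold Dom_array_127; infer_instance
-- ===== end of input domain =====

-- B replaces A's streaming run-buffer state machine by three staged passes
-- (forward run lengths, backward propagation, elementwise map); objective: alternative.

-- ===== PORT A =====
-- one loop iteration of A: state = (result, current_series, previous_value)
def array127Step (K : Int) (st : List Int × List Int × Option Int) (element : Int) :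
    List Int × List Int × Option Int :=
  match st with
  | (result, current_series, previous_value) =>
    if some element = previous_value then
      (result, current_series ++ [element], some element)
    else
      (if (current_series.length : Int) > K then
        result ++ List.replicate current_series.length 0
       else
        result ++ current_series,
       [element], some element)

def array_127 (array : List Int) (K : Int) : List Int :=
  match array.foldl (array127Step K) ([], [], none) with
  | (result, current_series, _) =>
    if (current_series.length : Int) > K then
      result ++ List.replicate current_series.length 0
    else
      result ++ current_series

-- ===== PORT B =====
-- forward pass: state = (fwd, acc, prev); fwd[i] = length of the equal-run ending at i
def altFwdStep (st : List Int × Int × Option Int) (x : Int) : List Int × Int × Option Int :=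
  match st with
  | (fwd, acc, prev) =>
    let acc' := if some x = prev then acc + 1 else 1
    (fwd ++ [acc'], acc', some x)

-- backward pass: state = (runlen, carry, prev); propagates each run's full length leftwards
def altBwdStep (st : List Int × Int × Option Int) (xf : Int × Int) : List Int × Int × Option Int :=
  match st with
  | (runlen, carry, prev) =>
    let carry' := if some xf.1 = prev then carry else xf.2
    (runlen ++ [carry'], carry', some xf.1)

def array_127_alt (array : List Int) (K : Int) : List Int :=
  let fwd := (array.foldl altFwdStep ([], 0, none)).1
  let runlen := (((array.zip fwd).reverse).foldl altBwdStep ([], 0, none)).1.reverse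
  (array.zip runlen).map (fun xr => if xr.2 > K then (0 : Int) else xr.1)

-- ===== PRECONDITION & SPEC =====
def Spec_array_127 (array : List Int) (K : Int) (out : List Int) : Prop := out = array_127_alt array K
instance (array : List Int) (K : Int) (out : List Int) : Decidable (Spec_array_127 array K out) := by unfold Spec_array_127; infer_instance

-- ===== CLAIM (what is proved, stated in full; the proofs are below) =====
def Claim_equal_array_127 : Prop := ∀ (array : List Int) (K : Int), Dom_array_127 array K → Spec_array_127 array K (array_127 array K)

-- ===== LEMMAS AND PROOFS =====

-- the list of maximal runs of equal consecutive elements (proof device)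
def pvRuns : List Int → List (List Int)
  | [] => []
  | x :: xs => (x :: xs.takeWhile (fun y => y == x)) :: pvRuns (xs.dropWhile (fun y => y == x))
  termination_by l => l.length
  decreasing_by
    simp only [List.length_cons]
    exact Nat.lt_succ_of_le (List.length_dropWhile_le _ _)

-- flush of a finished run (shared shape of both ports' if-branches)
def pvFlush (K : Int) (run : List Int) : List Int :=
  if (run.length : Int) > K then List.replicate run.length 0 else run

theorem takeWhile_replicate_append (v : Int) (n : Nat) (rest : List Int)
    (h : ∀ e t, rest = e :: t → e ≠ v) :
    (List.replicate n v ++ rest).takeWhile (fun y => y == v) = List.replicate n v := by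
  induction n with
  | zero =>
    cases rest with
    | nil => rfl
    | cons e t => simp [h e t rfl]
  | succ m ih => simp [List.replicate_succ, ih]

theorem dropWhile_replicate_append (v : Int) (n : Nat) (rest : List Int)
    (h : ∀ e t, rest = e :: t → e ≠ v) :
    (List.replicate n v ++ rest).dropWhile (fun y => y == v) = rest := by
  induction n with
  | zero =>
    cases rest with
    | nil => rfl
    | cons e t => simp [h e t rfl]
  | succ m ih => simp [List.replicate_succ, ih]

theorem pvRuns_replicate_append (v : Int) (n : Nat) (hn : 0 < n) (rest : List Int)
    (h : ∀ e t, rest = e :: t → e ≠ v) :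
    pvRuns (List.replicate n v ++ rest) = List.replicate n v :: pvRuns rest := by
  obtain ⟨m, rfl⟩ : ∃ m, n = m + 1 := ⟨n - 1, by omega⟩
  rw [List.replicate_succ, List.cons_append, pvRuns,
      takeWhile_replicate_append v m rest h, dropWhile_replicate_append v m rest h,
      ← List.replicate_succ]

-- ---- A-side: A's fold flushes the runs ----

theorem array127_loop (K : Int) (xs : List Int) :
    ∀ (r : List Int) (v : Int) (n : Nat), 0 < n →
    (match xs.foldl (array127Step K) (r, List.replicate n v, some v) with
     | (result, cs, _) => result ++ pvFlush K cs)
      = r ++ (pvRuns (List.replicate n v ++ xs)).flatMap (pvFlush K) := by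
  induction xs with
  | nil =>
    intro r v n hn
    simp only [List.foldl_nil, List.append_nil]
    have h0 := pvRuns_replicate_append v n hn [] (by intro e t h; cases h)
    rw [List.append_nil] at h0
    rw [h0]
    simp [pvRuns, List.flatMap_cons]
  | cons e rest ih =>
    intro r v n hn
    by_cases hev : e = v
    · subst hev
      have : array127Step K (r, List.replicate n e, some e) e
          = (r, List.replicate (n + 1) e, some e) := by
        simp [array127Step, List.replicate_succ']
      rw [List.foldl_cons, this, ih r e (n + 1) (by omega)]
      have : List.replicate (n + 1) e ++ rest = List.replicate n e ++ (e :: rest) := by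
        rw [List.replicate_succ']; simp
      rw [this]
    · have : array127Step K (r, List.replicate n v, some v) e
          = (r ++ pvFlush K (List.replicate n v), [e], some e) := by
        unfold array127Step pvFlush
        simp [hev]
        split <;> rfl
      rw [List.foldl_cons, this]
      have h1 : [e] = List.replicate 1 e := rfl
      rw [h1, ih _ e 1 (by omega)]
      rw [pvRuns_replicate_append v n hn (e :: rest)
            (by intro a t hh; injection hh with h1 _; subst h1; exact hev)]
      simp [List.flatMap_cons]

theorem array127_runs (K : Int) (l : List Int) :
    array_127 l K = (pvRuns l).flatMap (pvFlush K) := by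
  cases l with
  | nil => simp [array_127, pvRuns]
  | cons x xs =>
    unfold array_127
    rw [List.foldl_cons]
    have hstep : array127Step K ([], [], none) x = ([], [x], some x) := by
      simp [array127Step]
    rw [hstep]
    have hmain := array127_loop K xs [] x 1 (by omega)
    simp only [List.replicate_one] at hmain
    rcases hp : List.foldl (array127Step K) ([], [x], some x) xs with ⟨res, cs, pv⟩
    rw [hp] at hmain
    simp only [List.nil_append] at hmain
    have hcons : ([x] : List Int) ++ xs = x :: xs := rfl
    rw [hcons] at hmain
    show (if (cs.length : Int) > K then res ++ List.replicate cs.length 0 else res ++ cs)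
        = List.flatMap (pvFlush K) (pvRuns (x :: xs))
    rw [← hmain]
    unfold pvFlush
    split <;> rfl

-- ---- B-side: the three staged passes also flush the runs ----

-- the accumulated output list factors out of both folds
theorem fwd_prefix (xs : List Int) : ∀ (f0 : List Int) (a : Int) (p : Option Int),
    xs.foldl altFwdStep (f0, a, p)
      = (f0 ++ (xs.foldl altFwdStep ([], a, p)).1,
         (xs.foldl altFwdStep ([], a, p)).2) := by
  induction xs with
  | nil => intro f0 a p; simp
  | cons x t ih =>
    intro f0 a p
    simp only [List.foldl_cons, altFwdStep]
    rw [ih (f0 ++ _), ih ([] ++ _)]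
    simp

theorem bwd_prefix (xs : List (Int × Int)) : ∀ (f0 : List Int) (a : Int) (p : Option Int),
    xs.foldl altBwdStep (f0, a, p)
      = (f0 ++ (xs.foldl altBwdStep ([], a, p)).1,
         (xs.foldl altBwdStep ([], a, p)).2) := by
  induction xs with
  | nil => intro f0 a p; simp
  | cons x t ih =>
    intro f0 a p
    simp only [List.foldl_cons, altBwdStep]
    rw [ih (f0 ++ _), ih ([] ++ _)]
    simp

theorem fwd_len (xs : List Int) : ∀ (a : Int) (p : Option Int),
    (xs.foldl altFwdStep ([], a, p)).1.length = xs.length := by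
  induction xs with
  | nil => intro a p; rfl
  | cons x t ih =>
    intro a p
    simp only [List.foldl_cons, altFwdStep]
    rw [fwd_prefix]
    simp [ih]

theorem bwd_len (xs : List (Int × Int)) : ∀ (a : Int) (p : Option Int),
    (xs.foldl altBwdStep ([], a, p)).1.length = xs.length := by
  induction xs with
  | nil => intro a p; rfl
  | cons x t ih =>
    intro x' p
    simp only [List.foldl_cons, altBwdStep]
    rw [bwd_prefix]
    simp [ih]

-- the forward pass is insensitive to the inherited (acc, prev) when the next element differs
theorem fwd_indep (xs : List Int) (a a' : Int) (p p' : Option Int)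
    (h : ∀ e t, xs = e :: t → some e ≠ p ∧ some e ≠ p') :
    (xs.foldl altFwdStep ([], a, p)).1 = (xs.foldl altFwdStep ([], a', p')).1 := by
  cases xs with
  | nil => rfl
  | cons e t =>
    obtain ⟨h1, h2⟩ := h e t rfl
    simp only [List.foldl_cons, altFwdStep, if_neg h1, if_neg h2]

-- forward pass over a run of equal values: outputs end with the run length
theorem fwd_rep (m : Nat) : ∀ (k : Int) (f : List Int) (v : Int),
    ∃ fs : List Int,
      (List.replicate (m + 1) v).foldl altFwdStep (f, k, some v)
        = (f ++ fs ++ [k + m + 1], k + m + 1, some v) ∧ fs.length = m := by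
  induction m with
  | zero =>
    intro k f v
    exact ⟨[], by simp [List.replicate_one, altFwdStep], rfl⟩
  | succ m ih =>
    intro k f v
    have hstep : (List.replicate (m + 2) v).foldl altFwdStep (f, k, some v)
        = (List.replicate (m + 1) v).foldl altFwdStep (f ++ [k + 1], k + 1, some v) := by
      rw [List.replicate_succ, List.foldl_cons]
      simp [altFwdStep]
    obtain ⟨fs, hfs, hlen⟩ := ih (k + 1) (f ++ [k + 1]) v
    refine ⟨(k + 1) :: fs, ?_, by simp [hlen]⟩
    rw [hstep, hfs]
    have he : k + 1 + (m : Int) + 1 = k + ((m + 1 : Nat) : Int) + 1 := by push_cast; ring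
    rw [he]
    simp

-- forward pass over a fresh run: ends with the run length n+1, starting from any state
theorem fwd_run (n : Nat) (v : Int) (a : Int) (p : Option Int) (hp : some v ≠ p) :
    ∃ fs : List Int,
      (List.replicate (n + 1) v).foldl altFwdStep ([], a, p)
        = (fs ++ [(n : Int) + 1], (n : Int) + 1, some v) ∧ fs.length = n := by
  cases n with
  | zero =>
    refine ⟨[], ?_, rfl⟩
    simp [List.replicate_one, altFwdStep, if_neg hp]
  | succ m =>
    have hstep : (List.replicate (m + 2) v).foldl altFwdStep ([], a, p)
        = (List.replicate (m + 1) v).foldl altFwdStep ([(1 : Int)], 1, some v) := by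
      rw [List.replicate_succ, List.foldl_cons]
      simp [altFwdStep, if_neg hp]
    obtain ⟨fs, hfs, hlen⟩ := fwd_rep m 1 [(1 : Int)] v
    refine ⟨(1 : Int) :: fs, ?_, by simp [hlen]⟩
    rw [hstep, hfs]
    have he : (1 : Int) + (m : Int) + 1 = ((m + 1 : Nat) : Int) + 1 := by push_cast; ring
    rw [he]
    simp

-- backward pass over pairs from one run (prev already equal): carry is kept
theorem bwd_const (fs : List Int) : ∀ (R : List Int) (c v : Int),
    (fs.map (fun f => (v, f))).foldl altBwdStep (R, c, some v)
      = (R ++ List.replicate fs.length c, c, some v) := by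
  induction fs with
  | nil => intro R c v; simp
  | cons f t ih =>
    intro R c v
    simp only [List.map_cons, List.foldl_cons, altBwdStep]
    rw [ih]
    simp [List.replicate_succ]

-- prev after a backward fold is the first component of the last processed pair
theorem bwd_last (pairs : List (Int × Int)) (st : List Int × Int × Option Int) (e f : Int) :
    ((pairs ++ [(e, f)]).foldl altBwdStep st).2.2 = some e := by
  rw [List.foldl_append]
  rcases (pairs.foldl altBwdStep st) with ⟨R, c, p⟩
  simp [altBwdStep]

theorem zip_replicate_left (fs : List Int) (v : Int) :
    (List.replicate fs.length v).zip fs = fs.map (fun f => (v, f)) := by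
  induction fs with
  | nil => rfl
  | cons f t ih => simp [List.replicate_succ, ih]

-- B on a leading run followed by a differing rest: the run is flushed, then B of the rest
theorem alt_run (K : Int) (n : Nat) (v : Int) (rest : List Int)
    (h : ∀ e t, rest = e :: t → e ≠ v) :
    array_127_alt (List.replicate (n + 1) v ++ rest) K
      = pvFlush K (List.replicate (n + 1) v) ++ array_127_alt rest K := by
  -- forward pass
  obtain ⟨fs, hfwd, hfslen⟩ := fwd_run n v 0 none (by simp)
  have hind : (rest.foldl altFwdStep ([], (n : Int) + 1, some v)).1
      = (rest.foldl altFwdStep ([], 0, none)).1 :=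
    fwd_indep rest ((n : Int) + 1) 0 (some v) none
      (by intro e t ht; exact ⟨by simpa using h e t ht, by simp⟩)
  have hfwdsplit :
      ((List.replicate (n + 1) v ++ rest).foldl altFwdStep ([], 0, none)).1
        = (fs ++ [(n : Int) + 1]) ++ (rest.foldl altFwdStep ([], 0, none)).1 := by
    rw [List.foldl_append, hfwd, fwd_prefix]
    simp only
    rw [hind]
  set r : List Int := (rest.foldl altFwdStep ([], 0, none)).1 with hr
  have hrlen : r.length = rest.length := fwd_len rest 0 none
  have hrunfwdlen : (fs ++ [(n : Int) + 1]).length = (List.replicate (n + 1) v).length := by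
    simp [hfslen]
  -- zip splits
  have hzip : (List.replicate (n + 1) v ++ rest).zip ((fs ++ [(n : Int) + 1]) ++ r)
      = (List.replicate (n + 1) v).zip (fs ++ [(n : Int) + 1]) ++ rest.zip r := by
    rw [List.zip_append (by simpa using hrunfwdlen.symm)]
  have hzrun : (List.replicate (n + 1) v).zip (fs ++ [(n : Int) + 1])
      = (fs ++ [(n : Int) + 1]).map (fun f => (v, f)) := by
    have : n + 1 = (fs ++ [(n : Int) + 1]).length := by simp [hfslen]
    rw [this, zip_replicate_left]
  -- backward pass: process rest part first, then the run part
  rcases hb : (rest.zip r).reverse.foldl altBwdStep ([], 0, none) with ⟨R, c, p⟩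
  have hRlen : R.length = rest.length := by
    have := bwd_len (rest.zip r).reverse 0 none
    rw [hb] at this
    simpa [hrlen] using this
  have hpne : some v ≠ p := by
    cases hrest : rest with
    | nil =>
      subst hrest
      have hp2 : p = none := by
        have := congrArg (fun s => s.2.2) hb
        simpa using this.symm
      rw [hp2]; simp
    | cons e t =>
      subst hrest
      cases hrr : r with
      | nil => simp [hrr] at hrlen
      | cons r0 rt =>
        have hsplit : ((e :: t).zip (r0 :: rt)).reverse
            = ((t.zip rt).reverse) ++ [(e, r0)] := by simp
        rw [hrr, hsplit] at hb
        have hlast := bwd_last (t.zip rt).reverse ([], 0, none) e r0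
        rw [hb] at hlast
        have hp2 : p = some e := hlast
        rw [hp2]
        simp
        intro hv
        exact h e t rfl hv.symm
  have hbrun : (((fs ++ [(n : Int) + 1]).map (fun f => (v, f))).reverse).foldl
        altBwdStep (R, c, p)
      = (R ++ List.replicate (n + 1) ((n : Int) + 1), (n : Int) + 1, some v) := by
    have hrev : ((fs ++ [(n : Int) + 1]).map (fun f => (v, f))).reverse
        = (v, (n : Int) + 1) :: (fs.reverse.map (fun f => (v, f))) := by
      simp [List.map_append]
    rw [hrev, List.foldl_cons]
    have hstep : altBwdStep (R, c, p) (v, (n : Int) + 1)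
        = (R ++ [(n : Int) + 1], (n : Int) + 1, some v) := by
      simp [altBwdStep, if_neg hpne]
    rw [hstep, bwd_const]
    simp [hfslen, List.replicate_succ]
  -- assemble
  unfold array_127_alt
  simp only
  rw [hfwdsplit]
  rw [hzip, List.reverse_append, List.foldl_append, hb, hzrun, hbrun]
  rw [List.reverse_append, List.reverse_replicate]
  have hzip2 : (List.replicate (n + 1) v ++ rest).zip
        (List.replicate (n + 1) ((n : Int) + 1) ++ R.reverse)
      = (List.replicate (n + 1) v).zip (List.replicate (n + 1) ((n : Int) + 1))
          ++ rest.zip R.reverse := by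
    rw [List.zip_append (by simp)]
  rw [hzip2, List.map_append]
  congr 1
  · -- run part maps to the flush of the run
    rw [List.zip_replicate, Nat.min_self, List.map_replicate]
    unfold pvFlush
    simp only [List.length_replicate]
    push_cast
    by_cases hK : (n : Int) + 1 > K
    · simp [hK]
    · simp [hK]

theorem alt_runs (K : Int) : ∀ (l : List Int),
    array_127_alt l K = (pvRuns l).flatMap (pvFlush K) := by
  intro l
  induction hn : l.length using Nat.strong_induction_on generalizing l with
  | _ n ih =>
    cases l with
    | nil => subst hn; simp [array_127_alt, pvRuns]
    | cons x xs =>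
      have hdecomp : x :: xs
          = List.replicate (xs.takeWhile (fun y => y == x)).length.succ x
              ++ xs.dropWhile (fun y => y == x) := by
        have h1 : xs.takeWhile (fun y => y == x)
            = List.replicate (xs.takeWhile (fun y => y == x)).length x := by
          apply List.eq_replicate_of_mem
          intro b hb
          have := List.mem_takeWhile_imp hb
          simpa using this
        conv_lhs => rw [← List.takeWhile_append_dropWhile (p := fun y => y == x) (l := xs)]
        rw [List.replicate_succ, List.cons_append]
        conv_lhs => rw [h1]
      set m := (xs.takeWhile (fun y => y == x)).length with hm
      set rest := xs.dropWhile (fun y => y == x) with hrest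
      have hne : ∀ e t, rest = e :: t → e ≠ x := by
        intro e t ht hex
        have := List.head?_dropWhile_not (p := fun y => y == x) (l := xs)
        rw [← hrest, ht] at this
        simp [hex] at this
      have hrestlen : rest.length < n := by
        subst hn
        have h1 : (x :: xs).length = m + 1 + rest.length := by
          rw [hdecomp]; simp [Nat.succ_eq_add_one]
        omega
      rw [hdecomp]
      have hm1 : m.succ = m + 1 := rfl
      rw [hm1]
      rw [alt_run K m x rest hne]
      rw [pvRuns_replicate_append x (m + 1) (by omega) rest hne]
      rw [List.flatMap_cons]
      congr 1
      exact ih rest.length hrestlen rest rfl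

-- ===== VERDICT (by name: the statement is the Claim_ definition above) =====
theorem array_127_spec : Claim_equal_array_127 := by
  intro array K _
  unfold Spec_array_127
  rw [array127_runs, alt_runs]
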